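-- pv_equiv track=rewrite | github.com/phitoduck/python-course-rpg | prev/refactored_rpg.py | draw_ascii_art
-- ===== SOURCE A (Python) =====
-- def draw_ascii_art(player_art: str, dragon_art: str) -> str:
--     """Combine the player and dragon ASCII art into one string."""
--     player_lines = player_art.split("\n")
--     dragon_lines = dragon_art.split("\n")
--     offset = len(player_lines) - len(dragon_lines)
--     if offset < 0:
--         offset = 0
--
--     combined_art_lines = [
--         horizontally_concat_strings(
--             player_lines[i] if i < len(player_lines) else " " * len(player_lines[0]),
--             " " * 3,
--             dragon_lines[i - offset]
--             if i >= offset and i < offset + len(dragon_lines)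
--             else " " * len(dragon_lines[0]),
--         )
--         for i in range(max(len(player_lines), len(dragon_lines)))
--     ]
--     return "\n".join(combined_art_lines)
--
-- def horizontally_concat_strings(*strings: str) -> str:
--     """Concatenates a sequence of strings horizontally."""
--     return "".join(strings)
-- ===== SOURCE B (Python) =====
-- def draw_ascii_art(player_art: str, dragon_art: str) -> str:
--     """Combine the player and dragon ASCII art into one string."""
--     player_lines = player_art.split("\n")
--     dragon_lines = dragon_art.split("\n")
--     blank_player = " " * len(player_lines[0])
--     blank_dragon = " " * len(dragon_lines[0])
--
--     def merge(ps, ds):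
--         # bottom-align: while the player column is strictly taller, the dragon
--         # side is still blank; afterwards rows pair off one-for-one; leftover
--         # dragon rows get a blank player side.
--         if ps:
--             if len(ps) > len(ds):
--                 return [ps[0] + "   " + blank_dragon] + merge(ps[1:], ds)
--             return [ps[0] + "   " + ds[0]] + merge(ps[1:], ds[1:])
--         return [blank_player + "   " + d for d in ds]
--
--     return "\n".join(merge(player_lines, dragon_lines))
-- ===== Notes on version B (the rewrite author's own statement) =====
-- stated objective: alternative
-- what changed: B replaces A's indexed range comprehension with offset arithmetic and conditional fallbacks by a recursive merge of the two line lists themselves: it emits player-only rows while the player list is strictly longer, then pairs rows one-for-one, then maps the leftover dragon rows, so no index, offset or padded list is ever computed.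
import Mathlib
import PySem

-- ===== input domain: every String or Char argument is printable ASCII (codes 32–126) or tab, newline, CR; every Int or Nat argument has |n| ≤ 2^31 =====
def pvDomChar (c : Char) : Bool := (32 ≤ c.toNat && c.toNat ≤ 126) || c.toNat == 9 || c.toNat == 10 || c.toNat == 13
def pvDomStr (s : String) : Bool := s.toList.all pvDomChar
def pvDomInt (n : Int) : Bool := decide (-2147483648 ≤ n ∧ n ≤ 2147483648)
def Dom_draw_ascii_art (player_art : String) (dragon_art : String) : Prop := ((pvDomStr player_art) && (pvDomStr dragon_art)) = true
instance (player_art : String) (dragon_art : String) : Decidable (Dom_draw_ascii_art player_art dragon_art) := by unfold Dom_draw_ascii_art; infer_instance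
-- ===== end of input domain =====

-- B replaces A's indexed comprehension (range/offset arithmetic with conditional fallbacks)
-- by a recursive merge of the two line lists themselves; objective: alternative (no speed claim).

-- ===== PORT A =====
-- helper: horizontally_concat_strings(*strings) = "".join(strings)
def horizontally_concat_strings (strings : List String) : String :=
  PySem.Str.join "" strings

def draw_ascii_art (player_art : String) (dragon_art : String) : String :=
  let player_lines := (PySem.Str.split? player_art "\n").getD []
  let dragon_lines := (PySem.Str.split? dragon_art "\n").getD []
  let offset0 : Int := (player_lines.length : Int) - (dragon_lines.length : Int)
  let offset : Int := if offset0 < 0 then 0 else offset0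
  let combined_art_lines :=
    (PySem.List.pyRange 0 (max (player_lines.length : Int) (dragon_lines.length : Int)) 1).map
      (fun i =>
        horizontally_concat_strings
          [ if i < (player_lines.length : Int) then PySem.List.pyGetD player_lines i ""
            else String.ofList (List.replicate (player_lines.getD 0 "").toList.length ' ')
          , String.ofList (List.replicate 3 ' ')
          , if offset ≤ i ∧ i < offset + (dragon_lines.length : Int) then
              PySem.List.pyGetD dragon_lines (i - offset) ""
            else String.ofList (List.replicate (dragon_lines.getD 0 "").toList.length ' ') ])
  PySem.Str.join "\n" combined_art_lines

-- ===== PORT B =====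
-- B's recursive merge: player-only rows while the player list is strictly longer,
-- then rows pair off one-for-one, then leftover dragon rows get a blank player side.
def mergeRows (blank_player blank_dragon : String) : List String → List String → List String
  | [], ds => ds.map (fun d => blank_player ++ "   " ++ d)
  | p :: ps, ds =>
    if ds.length < ps.length + 1 then
      (p ++ "   " ++ blank_dragon) :: mergeRows blank_player blank_dragon ps ds
    else
      match ds with
      | d :: ds' => (p ++ "   " ++ d) :: mergeRows blank_player blank_dragon ps ds'
      | [] => []  -- unreachable: here ds.length ≥ ps.length + 1 > 0

def draw_ascii_art_alt (player_art : String) (dragon_art : String) : String :=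
  let player_lines := (PySem.Str.split? player_art "\n").getD []
  let dragon_lines := (PySem.Str.split? dragon_art "\n").getD []
  let blank_player := String.ofList (List.replicate (player_lines.getD 0 "").toList.length ' ')
  let blank_dragon := String.ofList (List.replicate (dragon_lines.getD 0 "").toList.length ' ')
  PySem.Str.join "\n" (mergeRows blank_player blank_dragon player_lines dragon_lines)

-- ===== PRECONDITION & SPEC =====
def Spec_draw_ascii_art (player_art : String) (dragon_art : String) (out : String) : Prop := out = draw_ascii_art_alt player_art dragon_art
instance (player_art : String) (dragon_art : String) (out : String) : Decidable (Spec_draw_ascii_art player_art dragon_art out) := by unfold Spec_draw_ascii_art; infer_instance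

-- ===== CLAIM (what is proved, stated in full; the proofs are below) =====
def Claim_equal_draw_ascii_art : Prop := ∀ (player_art : String) (dragon_art : String), Dom_draw_ascii_art player_art dragon_art → Spec_draw_ascii_art player_art dragon_art (draw_ascii_art player_art dragon_art)

-- ===== LEMMAS AND PROOFS =====

-- "".join([a, b, c]) is plain concatenation.
theorem join_empty_three (a b c : String) : PySem.Str.join "" [a, b, c] = a ++ b ++ c := by
  apply String.toList_inj.mp
  simp [PySem.Str.toList_join, PySem.Chars.join, List.intercalate]

theorem ofList_rep3 : String.ofList (List.replicate 3 ' ') = "   " := by decide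

-- A's indexed comprehension produces exactly the zip of the two bottom-aligned padded columns.
theorem comprehension_eq_zip (P D : List String) (bp bd : String) :
    (PySem.List.pyRange 0 (max (P.length : Int) (D.length : Int)) 1).map
      (fun i =>
        horizontally_concat_strings
          [ if i < (P.length : Int) then PySem.List.pyGetD P i "" else bp
          , String.ofList (List.replicate 3 ' ')
          , if (if (P.length : Int) - (D.length : Int) < 0 then 0 else (P.length : Int) - (D.length : Int)) ≤ i ∧
               i < (if (P.length : Int) - (D.length : Int) < 0 then 0 else (P.length : Int) - (D.length : Int)) + (D.length : Int) then
              PySem.List.pyGetD D (i - (if (P.length : Int) - (D.length : Int) < 0 then 0 else (P.length : Int) - (D.length : Int))) ""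
            else bd ])
    = List.zipWith (fun p d => p ++ "   " ++ d)
        (P ++ List.replicate (max P.length D.length - P.length) bp)
        (List.replicate (P.length - D.length) bd ++ D) := by
  have ho : (if (P.length : Int) - (D.length : Int) < 0 then 0 else (P.length : Int) - (D.length : Int))
      = ((P.length - D.length : Nat) : Int) := by split_ifs with h <;> omega
  have hmax : (max (P.length : Int) (D.length : Int)) = ((max P.length D.length : Nat) : Int) := by
    push_cast; rfl
  rw [ho, hmax, PySem.List.pyRange_zero_natCast, List.map_map]
  apply List.ext_getElem
  · simp; omega
  · intro i h1 h2
    simp only [List.getElem_map, List.getElem_range, Function.comp_apply, List.getElem_zipWith,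
      horizontally_concat_strings, join_empty_three, ofList_rep3]
    have hi : i < max P.length D.length := by simpa using h1
    congr 1
    · congr 1
      by_cases hp : i < P.length
      · rw [if_pos (by exact_mod_cast hp), PySem.List.pyGetD_natCast,
          List.getD_eq_getElem _ _ hp, List.getElem_append_left hp]
      · rw [if_neg (by omega), List.getElem_append_right (by omega), List.getElem_replicate]
    · by_cases hd : P.length - D.length ≤ i
      · rw [if_pos ⟨by exact_mod_cast hd, by omega⟩]
        have : (i : Int) - ((P.length - D.length : Nat) : Int) = ((i - (P.length - D.length) : Nat) : Int) := by omega
        rw [this, PySem.List.pyGetD_natCast, List.getD_eq_getElem _ _ (by omega),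
          List.getElem_append_right (by simpa using hd)]
        simp
      · rw [if_neg (by omega), List.getElem_append_left (by simpa using (by omega : i < P.length - D.length)),
          List.getElem_replicate]

-- B's recursive merge produces the same zip of padded columns.
theorem mergeRows_eq_zip (bp bd : String) (P D : List String) :
    mergeRows bp bd P D
      = List.zipWith (fun p d => p ++ "   " ++ d)
          (P ++ List.replicate (max P.length D.length - P.length) bp)
          (List.replicate (P.length - D.length) bd ++ D) := by
  induction P generalizing D with
  | nil =>
    simp only [mergeRows, List.nil_append, List.length_nil, Nat.zero_max, Nat.sub_zero,
      Nat.zero_sub, List.replicate_zero]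
    induction D with
    | nil => simp
    | cons d ds ih => simp [List.replicate_succ, ih]
  | cons p ps ih =>
    rw [mergeRows.eq_def]
    dsimp only
    split_ifs with h
    · have h1 : max (p :: ps).length D.length - (p :: ps).length = 0 := by simp; omega
      have h2 : (p :: ps).length - D.length = (ps.length - D.length) + 1 := by simp; omega
      rw [h1, h2, List.replicate_zero, List.append_nil, List.replicate_succ]
      simp only [List.cons_append, List.zipWith_cons_cons]
      rw [ih D]
      have h3 : max ps.length D.length - ps.length = 0 := by omega
      rw [h3, List.replicate_zero, List.append_nil]
    · match D, h with
      | [], h => simp at h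
      | d :: ds, h =>
        have h' : ds.length ≥ ps.length := by simp at h; omega
        have h1 : (p :: ps).length - (d :: ds).length = 0 := by simp; omega
        rw [h1, List.replicate_zero, List.nil_append]
        simp only [List.cons_append, List.zipWith_cons_cons]
        rw [ih ds]
        have h2 : max (p :: ps).length (d :: ds).length - (p :: ps).length
            = max ps.length ds.length - ps.length := by
          simp only [List.length_cons]; omega
        rw [h2]
        have h3 : ps.length - ds.length = 0 := by omega
        rw [h3, List.replicate_zero, List.nil_append]

theorem draw_ascii_art_spec_aux (player_art dragon_art : String) :
    draw_ascii_art player_art dragon_art = draw_ascii_art_alt player_art dragon_art := by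
  unfold draw_ascii_art draw_ascii_art_alt
  exact congrArg (PySem.Str.join "\n")
    ((comprehension_eq_zip _ _ _ _).trans (mergeRows_eq_zip _ _ _ _).symm)

-- ===== VERDICT (by name: the statement is the Claim_ definition above) =====
theorem draw_ascii_art_spec : Claim_equal_draw_ascii_art := by
  intro p d _
  exact draw_ascii_art_spec_aux p d
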